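-- pv_equiv track=rewrite | github.com/acsac2025-tcp-amp/acsac2025_tcp_amp | tagging/tagging.py | check_repeats
-- ===== SOURCE A (Python) =====
-- from collections import Counter
--
-- def check_repeats(l):
--     freq_dict = Counter(l)
--     global_proof = False
--     for isn in freq_dict.keys():
--         if freq_dict[isn]>1:
--             odd_pos = False
--             prial_pos = False
--             for i in range(0,len(l)):
--                 if l[i]==isn and i%2==0:
--                     prial_pos=True
--                 elif l[i]==isn and i%2==1:
--                     odd_pos = True
--             if odd_pos==True and prial_pos==True:
--                 global_proof = True
--                 break
--     return global_proof
-- ===== SOURCE B (Python) =====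
-- def check_repeats(l):
--     even_seen = set()
--     odd_seen = set()
--     even = True
--     for x in l:
--         if even:
--             if x in odd_seen:
--                 return True
--             even_seen.add(x)
--         else:
--             if x in even_seen:
--                 return True
--             odd_seen.add(x)
--         even = not even
--     return False
-- ===== Notes on version B (the rewrite author's own statement) =====
-- stated objective: faster
-- what changed: Single left-to-right pass keeping two sets (values seen at even and at odd indices) with early exit, instead of building a Counter and rescanning the whole list once per repeated key.
import Mathlib
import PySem

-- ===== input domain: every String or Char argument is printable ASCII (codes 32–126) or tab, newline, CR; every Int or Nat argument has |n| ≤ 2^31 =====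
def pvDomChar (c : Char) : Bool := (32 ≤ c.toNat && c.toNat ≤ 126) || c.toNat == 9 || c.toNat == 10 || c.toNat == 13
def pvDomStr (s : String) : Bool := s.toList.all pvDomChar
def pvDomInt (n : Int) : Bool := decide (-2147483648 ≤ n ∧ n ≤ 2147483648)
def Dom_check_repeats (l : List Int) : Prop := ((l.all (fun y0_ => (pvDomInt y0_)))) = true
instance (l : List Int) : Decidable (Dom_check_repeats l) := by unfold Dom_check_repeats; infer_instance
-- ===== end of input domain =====

-- B changes the algorithm: one pass with two seen-sets (per index parity) instead of Counter + rescan per key.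

-- ===== PORT A =====
-- inner 'for i in range(0,len(l))' loop: state (odd_pos, prial_pos)
def aInner (l : List Int) (isn : Int) : Bool × Bool :=
  (PySem.List.enumerate l 0).foldl
    (fun (st : Bool × Bool) p =>
      if p.2 == isn && p.1 % 2 == 0 then (st.1, true)
      else if p.2 == isn && p.1 % 2 == 1 then (true, st.2)
      else st)
    (false, false)

-- outer 'for isn in freq_dict.keys()' loop with break
def aOuter (l : List Int) (fd : PySem.Dict Int Int) : List Int → Bool
  | [] => false
  | isn :: rest =>
      if fd.getD isn 0 > 1 then
        let st := aInner l isn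
        if st.1 && st.2 then true else aOuter l fd rest
      else aOuter l fd rest

def check_repeats (l : List Int) : Bool :=
  let fd := PySem.Dict.counter l
  aOuter l fd fd.keys

-- ===== PORT B =====
def altGo (evenSeen oddSeen : PySem.Set Int) : Bool → List Int → Bool
  | _, [] => false
  | true, x :: rest =>
      if x ∈ oddSeen then true
      else altGo (PySem.Set.add evenSeen x) oddSeen false rest
  | false, x :: rest =>
      if x ∈ evenSeen then true
      else altGo evenSeen (PySem.Set.add oddSeen x) true rest

def check_repeats_alt (l : List Int) : Bool :=
  altGo PySem.Set.empty PySem.Set.empty true l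

-- ===== PRECONDITION & SPEC =====
def Spec_check_repeats (l : List Int) (out : Bool) : Prop := out = check_repeats_alt l
instance (l : List Int) (out : Bool) : Decidable (Spec_check_repeats l out) := by unfold Spec_check_repeats; infer_instance

-- ===== CLAIM (what is proved, stated in full; the proofs are below) =====
def Claim_equal_check_repeats : Prop := ∀ (l : List Int), Dom_check_repeats l → Spec_check_repeats l (check_repeats l)

-- ===== LEMMAS AND PROOFS =====

-- values at even / odd positions of a list
mutual
def evens : List Int → List Int
  | [] => []
  | x :: rest => x :: odds rest
def odds : List Int → List Int
  | [] => []
  | _ :: rest => evens rest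
end

theorem mem_evens_odds_mem (l : List Int) (v : Int) :
    (v ∈ evens l → v ∈ l) ∧ (v ∈ odds l → v ∈ l) := by
  induction l with
  | nil => simp [evens, odds]
  | cons x rest ih =>
      simp only [evens, odds, List.mem_cons]
      tauto

theorem count_evens_odds (l : List Int) (v : Int) :
    l.count v = (evens l).count v + (odds l).count v := by
  induction l with
  | nil => simp [evens, odds]
  | cons x rest ih =>
      simp only [evens, odds, List.count_cons, ih]
      induction rest with
      | nil => simp [evens, odds]
      | cons y r _ => simp only [evens, odds]; omega

theorem aInner_eq (isn : Int) (l : List Int) : ∀ (s : Int) (st : Bool × Bool), 0 ≤ s →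
    (s % 2 = 0 →
      (PySem.List.enumerate l s).foldl
        (fun (st : Bool × Bool) p =>
          if p.2 == isn && p.1 % 2 == 0 then (st.1, true)
          else if p.2 == isn && p.1 % 2 == 1 then (true, st.2)
          else st) st
      = (st.1 || decide (isn ∈ odds l), st.2 || decide (isn ∈ evens l)))
    ∧ (s % 2 = 1 →
      (PySem.List.enumerate l s).foldl
        (fun (st : Bool × Bool) p =>
          if p.2 == isn && p.1 % 2 == 0 then (st.1, true)
          else if p.2 == isn && p.1 % 2 == 1 then (true, st.2)
          else st) st
      = (st.1 || decide (isn ∈ evens l), st.2 || decide (isn ∈ odds l))) := by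
  induction l with
  | nil => intro s st hs; simp [PySem.List.enumerate, evens, odds]
  | cons x rest ih =>
      intro s st hs
      constructor
      · intro h0
        simp only [PySem.List.enumerate_cons, List.foldl_cons]
        split
        · next hc =>
            have hx : x = isn := by
              simp only [Bool.and_eq_true, beq_iff_eq] at hc
              exact hc.1
            rw [(ih (s + 1) (st.1, true) (by omega)).2 (by omega)]
            simp [evens, odds, hx]
            rfl
        · next hc1 =>
            split
            · next hc2 =>
                exfalso
                simp only [Bool.and_eq_true, beq_iff_eq] at hc2
                omega
            · next hc2 =>
                have hx : ¬ isn = x := by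
                  intro h
                  exact hc1 (by simp [h.symm, h0])
                rw [(ih (s + 1) st (by omega)).2 (by omega)]
                simp [evens, odds, hx]
                rfl
      · intro h1
        simp only [PySem.List.enumerate_cons, List.foldl_cons]
        split
        · next hc =>
            exfalso
            simp only [Bool.and_eq_true, beq_iff_eq] at hc
            omega
        · next hc1 =>
            split
            · next hc2 =>
                have hx : x = isn := by
                  simp only [Bool.and_eq_true, beq_iff_eq] at hc2
                  exact hc2.1
                rw [(ih (s + 1) (true, st.2) (by omega)).1 (by omega)]
                simp [evens, odds, hx]
                rfl
            · next hc2 =>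
                have hx : ¬ isn = x := by
                  intro h
                  exact hc2 (by simp [h.symm, h1])
                rw [(ih (s + 1) st (by omega)).1 (by omega)]
                simp [evens, odds, hx]
                rfl

theorem aInner_val (l : List Int) (isn : Int) :
    aInner l isn = (decide (isn ∈ odds l), decide (isn ∈ evens l)) := by
  have := (aInner_eq isn l 0 (false, false) (by omega)).1 (by omega)
  simpa [aInner] using this

theorem aOuter_iff (l : List Int) (fd : PySem.Dict Int Int) (ks : List Int) :
    aOuter l fd ks = true ↔
      ∃ isn ∈ ks, fd.getD isn 0 > 1 ∧ isn ∈ odds l ∧ isn ∈ evens l := by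
  induction ks with
  | nil => simp [aOuter]
  | cons k rest ih =>
      simp only [aOuter, aInner_val]
      split_ifs with h1 h2
      · simp only [Bool.and_eq_true, decide_eq_true_eq] at h2
        simp only [true_iff]
        exact ⟨k, by simp, h1, h2.1, h2.2⟩
      · simp only [ih, List.mem_cons]
        constructor
        · rintro ⟨isn, hm, h⟩; exact ⟨isn, Or.inr hm, h⟩
        · rintro ⟨isn, hm, h⟩
          rcases hm with rfl | hm
          · exact absurd (by simp [h.2.1, h.2.2]) h2
          · exact ⟨isn, hm, h⟩
      · simp only [ih, List.mem_cons]
        constructor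
        · rintro ⟨isn, hm, h⟩; exact ⟨isn, Or.inr hm, h⟩
        · rintro ⟨isn, hm, h⟩
          rcases hm with rfl | hm
          · exact absurd h.1 h1
          · exact ⟨isn, hm, h⟩

theorem check_repeats_iff (l : List Int) :
    check_repeats l = true ↔ ∃ v, v ∈ evens l ∧ v ∈ odds l := by
  simp only [check_repeats, aOuter_iff]
  constructor
  · rintro ⟨isn, _, _, ho, he⟩; exact ⟨isn, he, ho⟩
  · rintro ⟨v, he, ho⟩
    refine ⟨v, ?_, ?_, ho, he⟩
    · have : v ∈ l := (mem_evens_odds_mem l v).1 he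
      simpa [PySem.Dict.keys_counter, PySem.Set.mem_ofList] using this
    · have h1 : 1 ≤ (evens l).count v := List.one_le_count_iff.mpr he
      have h2 : 1 ≤ (odds l).count v := List.one_le_count_iff.mpr ho
      have := count_evens_odds l v
      have : 2 ≤ l.count v := by omega
      simp only [PySem.Dict.getD_counter]
      exact_mod_cast by omega
  
theorem altGo_iff (rest : List Int) : ∀ (E O : PySem.Set Int),
    (altGo E O true rest = true ↔
      (∃ v ∈ evens rest, v ∈ O) ∨ (∃ v ∈ odds rest, v ∈ E) ∨ ∃ v, v ∈ evens rest ∧ v ∈ odds rest)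
    ∧ (altGo E O false rest = true ↔
      (∃ v ∈ evens rest, v ∈ E) ∨ (∃ v ∈ odds rest, v ∈ O) ∨ ∃ v, v ∈ evens rest ∧ v ∈ odds rest) := by
  induction rest with
  | nil => intro E O; simp [altGo, evens, odds]
  | cons x r ih =>
      intro E O
      constructor
      · simp only [altGo, evens, odds, List.mem_cons]
        by_cases hO : x ∈ O
        · rw [if_pos hO]
          simp only [true_iff]
          exact Or.inl ⟨x, Or.inl rfl, hO⟩
        · rw [if_neg hO, (ih (PySem.Set.add E x) O).2]
          simp only [PySem.Set.mem_add]
          constructor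
          · rintro (⟨v, hv, hvE⟩ | ⟨v, hv, hvO⟩ | ⟨v, h1, h2⟩)
            · rcases hvE with hvE | rfl
              · exact Or.inr (Or.inl ⟨v, hv, hvE⟩)
              · exact Or.inr (Or.inr ⟨v, Or.inl rfl, hv⟩)
            · exact Or.inl ⟨v, Or.inr hv, hvO⟩
            · exact Or.inr (Or.inr ⟨v, Or.inr h2, h1⟩)
          · rintro (⟨v, hv, hvO⟩ | ⟨v, hv, hvE⟩ | ⟨v, hv, h2⟩)
            · rcases hv with rfl | hv
              · exact absurd hvO hO
              · exact Or.inr (Or.inl ⟨v, hv, hvO⟩)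
            · exact Or.inl ⟨v, hv, Or.inl hvE⟩
            · rcases hv with rfl | hv
              · exact Or.inl ⟨v, h2, Or.inr rfl⟩
              · exact Or.inr (Or.inr ⟨v, h2, hv⟩)
      · simp only [altGo, evens, odds, List.mem_cons]
        by_cases hE : x ∈ E
        · rw [if_pos hE]
          simp only [true_iff]
          exact Or.inl ⟨x, Or.inl rfl, hE⟩
        · rw [if_neg hE, (ih E (PySem.Set.add O x)).1]
          simp only [PySem.Set.mem_add]
          constructor
          · rintro (⟨v, hv, hvO⟩ | ⟨v, hv, hvE⟩ | ⟨v, h1, h2⟩)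
            · rcases hvO with hvO | rfl
              · exact Or.inr (Or.inl ⟨v, hv, hvO⟩)
              · exact Or.inr (Or.inr ⟨v, Or.inl rfl, hv⟩)
            · exact Or.inl ⟨v, Or.inr hv, hvE⟩
            · exact Or.inr (Or.inr ⟨v, Or.inr h2, h1⟩)
          · rintro (⟨v, hv, hvE⟩ | ⟨v, hv, hvO⟩ | ⟨v, hv, h2⟩)
            · rcases hv with rfl | hv
              · exact absurd hvE hE
              · exact Or.inr (Or.inl ⟨v, hv, hvE⟩)
            · exact Or.inl ⟨v, hv, Or.inl hvO⟩
            · rcases hv with rfl | hv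
              · exact Or.inl ⟨v, h2, Or.inr rfl⟩
              · exact Or.inr (Or.inr ⟨v, h2, hv⟩)

theorem check_repeats_alt_iff (l : List Int) :
    check_repeats_alt l = true ↔ ∃ v, v ∈ evens l ∧ v ∈ odds l := by
  rw [check_repeats_alt, (altGo_iff l PySem.Set.empty PySem.Set.empty).1]
  simp [PySem.Set.empty]

-- ===== VERDICT (by name: the statement is the Claim_ definition above) =====
theorem check_repeats_spec : Claim_equal_check_repeats := by
  intro l _
  unfold Spec_check_repeats
  have h := (check_repeats_iff l).trans (check_repeats_alt_iff l).symm
  cases hA : check_repeats l <;> cases hB : check_repeats_alt l <;> simp_all
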